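-- pv_equiv track=rewrite | github.com/jon-chun/agenticsimlaw | src/step3_statistical_analysis_ver11_FREEZE.py | get_output_columns
-- ===== SOURCE A (Python) =====
-- def get_output_columns(summary_data):
--     """
--     Dynamically generate output column list based on available data.
--     """
--     base_columns = [
--         'model_name', 'prompt_type', 'total_attempts', 'api_call_ct',
--         'api_success_ct', 'api_success_percent', 'prediction_yes_percent',
--         'prediction_correct_percent', 'confidence_median',
--         # New metrics
--         'f1_score', 'accuracy', 'precision', 'recall',
--         'true_positive', 'true_negative', 'false_positive', 'false_negative'
--     ]
--
--     all_columns = set()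
--     for row in summary_data:
--         all_columns.update(row.keys())
--
--     output_columns = base_columns + [
--         col for col in [
--             'accuracy_median', 'f1_score_median', 'confusion_matrix',
--             'confidence_median'
--         ] if col in all_columns
--     ]
--
--     # Add available speaker metrics in order
--     for i in range(6):
--         for metric in [
--             f'speaker{i}_prompt_eval_ct_median',
--             f'speaker{i}_eval_ct_median',
--             f'speaker{i}_token_total_median',
--             f'speaker{i}_total_duration_sec_median'
--         ]:
--             if any(metric in row for row in summary_data):
--                 output_columns.append(metric)
--
--     # Add overall speaker metrics if available
--     for metric in ['speaker_all_token_median', 'speaker_all_total_duration_sec_median']: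
--         if any(metric in row for row in summary_data):
--             output_columns.append(metric)
--
--     return output_columns
-- ===== SOURCE B (Python) =====
-- def get_output_columns(summary_data):
--     """
--     Dynamically generate output column list based on available data.
--     Single marking pass: a presence flag per candidate column, set while
--     streaming over the data's keys once; no key-union set, no per-metric
--     rescans of the rows.
--     """
--     base_columns = [
--         'model_name', 'prompt_type', 'total_attempts', 'api_call_ct',
--         'api_success_ct', 'api_success_percent', 'prediction_yes_percent',
--         'prediction_correct_percent', 'confidence_median',
--         'f1_score', 'accuracy', 'precision', 'recall',
--         'true_positive', 'true_negative', 'false_positive', 'false_negative'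
--     ]
--     candidates = (
--         ['accuracy_median', 'f1_score_median', 'confusion_matrix',
--          'confidence_median']
--         + [f'speaker{i}_{suffix}'
--            for i in range(6)
--            for suffix in ('prompt_eval_ct_median', 'eval_ct_median',
--                           'token_total_median', 'total_duration_sec_median')]
--         + ['speaker_all_token_median', 'speaker_all_total_duration_sec_median']
--     )
--     found = dict.fromkeys(candidates, False)
--     for row in summary_data:
--         for key in row:
--             if key in found:
--                 found[key] = True
--     return base_columns + [c for c in candidates if found[c]]
-- ===== Notes on version B (the rewrite author's own statement) =====
-- stated objective: alternative
-- what changed: B inverts the traversal: instead of A's per-metric scans over the rows (and a union-of-keys set for the first group), B keeps a presence-flag dict over the fixed candidate list, marks flags in one streaming pass over the data's keys, and then emits the candidates whose flag is set.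
import Mathlib
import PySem

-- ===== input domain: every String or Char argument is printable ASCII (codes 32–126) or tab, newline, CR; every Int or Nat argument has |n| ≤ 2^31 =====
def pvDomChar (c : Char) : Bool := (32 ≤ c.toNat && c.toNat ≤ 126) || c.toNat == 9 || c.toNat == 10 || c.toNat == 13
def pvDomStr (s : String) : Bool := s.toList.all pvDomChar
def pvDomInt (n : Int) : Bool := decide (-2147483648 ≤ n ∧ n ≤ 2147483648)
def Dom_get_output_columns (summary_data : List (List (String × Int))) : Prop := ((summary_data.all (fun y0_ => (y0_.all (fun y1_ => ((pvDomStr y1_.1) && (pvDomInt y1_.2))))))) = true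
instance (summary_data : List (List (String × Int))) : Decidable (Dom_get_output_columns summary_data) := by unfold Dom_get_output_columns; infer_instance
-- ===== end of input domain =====

-- B inverts the traversal: a presence-flag dict over the fixed candidate list is
-- marked in one streaming pass over the data's keys, replacing A's per-metric row
-- scans and its union-of-keys set (objective: alternative).

-- shared literal of both Pythons
def baseColumns : List String :=
  ["model_name", "prompt_type", "total_attempts", "api_call_ct",
   "api_success_ct", "api_success_percent", "prediction_yes_percent",
   "prediction_correct_percent", "confidence_median",
   "f1_score", "accuracy", "precision", "recall",
   "true_positive", "true_negative", "false_positive", "false_negative"]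

-- f'speaker{i}_{suffix}' (exact on this domain: str(i) of a small int, ASCII concat)
def speakerMetric (i : Int) (suffix : String) : String :=
  "speaker" ++ PySem.Int.toStr i ++ "_" ++ suffix

-- ===== PORT A =====
def get_output_columns (summary_data : List (List (String × Int))) : List String :=
  -- all_columns = set(); for row: all_columns.update(row.keys())
  let all_columns : PySem.Set String :=
    summary_data.foldl (fun s row => PySem.Set.update s (row.map Prod.fst)) PySem.Set.empty
  -- base_columns + [col for col in [...] if col in all_columns]
  let output_columns :=
    baseColumns ++
      (["accuracy_median", "f1_score_median", "confusion_matrix",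
        "confidence_median"].filter (fun col => all_columns.contains col))
  -- for i in range(6): for metric in [...]: if any(metric in row for row in summary_data): append
  let output_columns :=
    (PySem.List.pyRange 0 6 1).foldl (fun acc i =>
      [speakerMetric i "prompt_eval_ct_median", speakerMetric i "eval_ct_median",
       speakerMetric i "token_total_median", speakerMetric i "total_duration_sec_median"].foldl
        (fun acc metric =>
          if summary_data.any (fun row => (row.map Prod.fst).contains metric)
          then acc ++ [metric] else acc) acc) output_columns
  -- for metric in [...]: if any(metric in row for row in summary_data): append
  let output_columns :=
    ["speaker_all_token_median", "speaker_all_total_duration_sec_median"].foldl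
      (fun acc metric =>
        if summary_data.any (fun row => (row.map Prod.fst).contains metric)
        then acc ++ [metric] else acc) output_columns
  output_columns

-- ===== PORT B =====
-- candidates = optional + speaker comprehension + overall (one flat literal list)
def candidateColumns : List String :=
  ["accuracy_median", "f1_score_median", "confusion_matrix", "confidence_median"]
    ++ (PySem.List.pyRange 0 6 1).flatMap (fun i =>
         ["prompt_eval_ct_median", "eval_ct_median", "token_total_median",
          "total_duration_sec_median"].map (speakerMetric i))
    ++ ["speaker_all_token_median", "speaker_all_total_duration_sec_median"]

def get_output_columns_alt (summary_data : List (List (String × Int))) : List String :=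
  -- found = dict.fromkeys(candidates, False)
  let found : PySem.Dict String Bool :=
    candidateColumns.foldl (fun d k => d.insert k false) PySem.Dict.empty
  -- for row in summary_data: for key in row: if key in found: found[key] = True
  let found :=
    summary_data.foldl (fun d row =>
      row.foldl (fun d kv =>
        if d.contains kv.1 then d.insert kv.1 true else d) d) found
  -- base_columns + [c for c in candidates if found[c]]
  baseColumns ++ candidateColumns.filter (fun c => found.getD c false)

-- ===== PRECONDITION & SPEC =====
def Spec_get_output_columns (summary_data : List (List (String × Int))) (out : List String) : Prop := out = get_output_columns_alt summary_data
instance (summary_data : List (List (String × Int))) (out : List String) : Decidable (Spec_get_output_columns summary_data out) := by unfold Spec_get_output_columns; infer_instance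

-- ===== CLAIM (what is proved, stated in full; the proofs are below) =====
def Claim_equal_get_output_columns : Prop := ∀ (summary_data : List (List (String × Int))), Dom_get_output_columns summary_data → Spec_get_output_columns summary_data (get_output_columns summary_data)

-- ===== LEMMAS AND PROOFS =====

-- A side: membership in the accumulated union-of-keys set = some row has the key
theorem contains_keyset (rows : List (List (String × Int))) (s : PySem.Set String) (x : String) :
    decide (x ∈ rows.foldl (fun s row => PySem.Set.update s (row.map Prod.fst)) s)
      = (decide (x ∈ s) || rows.any (fun row => decide (x ∈ row.map Prod.fst))) := by
  induction rows generalizing s with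
  | nil => simp
  | cons r rs ih =>
    rw [List.foldl_cons, ih, List.any_cons, ← Bool.or_assoc]
    congr 1
    simp only [← Bool.decide_or, decide_eq_decide]
    exact PySem.Set.mem_update (α := String) s (r.map Prod.fst) x

theorem filter_flatMap' {α β : Type} (l : List α) (g : α → List β) (p : β → Bool) :
    (l.flatMap g).filter p = l.flatMap (fun a => (g a).filter p) := by
  induction l with
  | nil => rfl
  | cons a l ih => simp [List.flatMap_cons, List.filter_append, ih]

-- B side: dict.fromkeys gives `some false` exactly on the key list
theorem get?_fromkeys (l : List String) (d : PySem.Dict String Bool) (c : String) :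
    (l.foldl (fun d k => d.insert k false) d).get? c
      = if l.contains c then some false else d.get? c := by
  induction l generalizing d with
  | nil => simp
  | cons k l ih =>
    rw [List.foldl_cons, ih, PySem.Dict.get?_insert, List.contains_cons]
    by_cases h2 : c = k
    · subst h2; by_cases h1 : l.contains c <;> simp [h1]
    · have hk : (c == k) = false := beq_eq_false_iff_ne.mpr h2
      by_cases h1 : l.contains c <;> simp [h1, h2, hk]

-- boolean helpers for the marking loops
theorem beq_swap (a b : String) : (a == b) = (b == a) := by
  by_cases h : a = b
  · simp [h]
  · simp [beq_eq_false_iff_ne.mpr h, beq_eq_false_iff_ne.mpr (fun hh => h hh.symm)]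

theorem ite_mark (a b s : Bool) (x : Option Bool) :
    (if (b && s) = true then some true else if (a && s) = true then some true else x)
      = if ((a || b) && s) = true then some true else x := by
  cases a <;> cases b <;> cases s <;> simp

-- B side: the inner marking loop over one row's (key, value) pairs
theorem get?_mark_row (row : List (String × Int)) (d : PySem.Dict String Bool) (c : String) :
    (row.foldl (fun d kv => if d.contains kv.1 then d.insert kv.1 true else d) d).get? c
      = if (row.map Prod.fst).contains c && (d.get? c).isSome then some true else d.get? c := by
  induction row generalizing d with
  | nil => simp
  | cons kv row ih =>
    rw [List.foldl_cons, ih]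
    have hstep : (if d.contains kv.1 then d.insert kv.1 true else d).get? c
        = if kv.1 == c && (d.get? c).isSome then some true else d.get? c := by
      by_cases hc : c = kv.1
      · rw [hc, PySem.Dict.contains_eq_isSome_get?]
        by_cases h1 : (d.get? kv.1).isSome
        · simp [h1, PySem.Dict.get?_insert_self]
        · simp [h1]
      · have hk : (kv.1 == c) = false := beq_eq_false_iff_ne.mpr (fun h => hc h.symm)
        by_cases h1 : d.contains kv.1
        · simp [h1, hk, PySem.Dict.get?_insert, hc]
        · simp [h1, hk]
    have hsome : ((if kv.1 == c && (d.get? c).isSome then some true else d.get? c)).isSome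
        = (d.get? c).isSome := by
      by_cases h : (kv.1 == c && (d.get? c).isSome) = true
      · rw [if_pos h]; simp [((Bool.and_eq_true _ _).mp h).2]
      · rw [if_neg h]
    rw [hstep, hsome, List.map_cons, List.contains_cons, ite_mark, beq_swap]

-- B side: the outer marking loop over all rows
theorem get?_mark (rows : List (List (String × Int))) (d : PySem.Dict String Bool) (c : String) :
    (rows.foldl (fun d row =>
        row.foldl (fun d kv => if d.contains kv.1 then d.insert kv.1 true else d) d) d).get? c
      = if rows.any (fun row => (row.map Prod.fst).contains c) && (d.get? c).isSome
        then some true else d.get? c := by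
  induction rows generalizing d with
  | nil => simp
  | cons r rows ih =>
    rw [List.foldl_cons, ih, get?_mark_row, List.any_cons]
    have hsome : ((if (r.map Prod.fst).contains c && (d.get? c).isSome then some true else d.get? c)).isSome
        = (d.get? c).isSome := by
      by_cases h : ((r.map Prod.fst).contains c && (d.get? c).isSome) = true
      · rw [if_pos h]; simp [((Bool.and_eq_true _ _).mp h).2]
      · rw [if_neg h]
    rw [hsome, ite_mark]

-- the marked flag of a candidate is exactly "some row has the key"
theorem getD_flag (sd : List (List (String × Int))) (c : String)
    (hc : candidateColumns.contains c) :
    (sd.foldl (fun d row =>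
        row.foldl (fun d kv => if d.contains kv.1 then d.insert kv.1 true else d) d)
      (candidateColumns.foldl (fun d k => d.insert k false) PySem.Dict.empty)).getD c false
      = sd.any (fun row => (row.map Prod.fst).contains c) := by
  rw [PySem.Dict.getD_eq_get?_getD, get?_mark, get?_fromkeys, hc]
  simp only [if_pos, Option.isSome_some, Bool.and_true]
  cases hb : sd.any (fun row => (row.map Prod.fst).contains c) <;> simp

-- ===== VERDICT (by name: the statement is the Claim_ definition above) =====
theorem get_output_columns_spec : Claim_equal_get_output_columns := by
  intro sd _
  show get_output_columns sd = get_output_columns_alt sd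
  simp only [get_output_columns, get_output_columns_alt]
  rw [List.filter_congr (fun c hc => getD_flag sd c (by simpa using hc))]
  unfold candidateColumns
  simp only [PySem.List.foldl_append_if_eq_filter, PySem.List.foldl_append_eq_flatMap,
    PySem.Set.empty, PySem.Set.contains, filter_flatMap', List.filter_append,
    List.append_assoc]
  simp [contains_keyset]
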